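-- pv_equiv track=rewrite | github.com/danielmast/advent-of-code-2021 | day14/day14_1.py | max_and_min_frequency
-- ===== SOURCE A (Python) =====
-- def max_and_min_frequency(frequencies):
--     max_element = None
--     max_frequency = 0
--     min_element = None
--     min_frequency = 0
--
--     for element in frequencies.keys():
--         if max_element is None or max_frequency < frequencies[element]:
--             max_element = element
--             max_frequency = frequencies[element]
--         if min_element is None or min_frequency > frequencies[element]:
--             min_element = element
--             min_frequency = frequencies[element]
--     return max_frequency, min_frequency
-- ===== SOURCE B (Python) =====
-- def max_and_min_frequency(frequencies):
--     ordered = sorted(frequencies.values())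
--     if not ordered:
--         return 0, 0
--     return ordered[-1], ordered[0]
-- ===== Notes on version B (the rewrite author's own statement) =====
-- stated objective: alternative
-- what changed: Replaces A's single-pass max/min state machine (tracked elements, None guards, per-key dict lookups) with sort-then-pick: sort the values once and return the endpoints of the sorted list, with (0, 0) for an empty dict.
import Mathlib
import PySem

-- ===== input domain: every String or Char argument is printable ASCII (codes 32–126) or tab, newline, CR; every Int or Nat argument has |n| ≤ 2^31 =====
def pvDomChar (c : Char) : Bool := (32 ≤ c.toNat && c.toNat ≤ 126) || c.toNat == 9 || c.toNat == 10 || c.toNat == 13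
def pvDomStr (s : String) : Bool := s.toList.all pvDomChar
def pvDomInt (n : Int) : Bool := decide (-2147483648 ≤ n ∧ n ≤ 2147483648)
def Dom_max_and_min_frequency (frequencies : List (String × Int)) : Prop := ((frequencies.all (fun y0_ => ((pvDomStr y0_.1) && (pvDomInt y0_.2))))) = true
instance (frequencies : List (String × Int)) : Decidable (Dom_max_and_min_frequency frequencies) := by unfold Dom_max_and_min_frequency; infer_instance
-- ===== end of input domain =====

-- B replaces A's single-pass max/min state machine with sort-then-pick: sort the values and return the endpoints (alternative decomposition, not faster).


-- ===== PORT A =====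
-- loop body: the two guarded updates, with frequencies[element] looked up in the dict
def pvStepA (fs : List (String × Int)) (st : Option String × Int × Option String × Int)
    (element : String) : Option String × Int × Option String × Int :=
  let v := (PySem.Dict.mk fs).getD element 0
  let (maxE, maxF, minE, minF) := st
  let (maxE, maxF) := if maxE = none ∨ maxF < v then (some element, v) else (maxE, maxF)
  let (minE, minF) := if minE = none ∨ minF > v then (some element, v) else (minE, minF)
  (maxE, maxF, minE, minF)

def max_and_min_frequency (frequencies : List (String × Int)) : Int × Int :=
  let st := ((PySem.Dict.mk frequencies).keys).foldl (pvStepA frequencies) (none, 0, none, 0)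
  (st.2.1, st.2.2.2)

-- ===== PORT B =====
-- ordered[-1] / ordered[0] are taken with pyGet?; in the guarded branch ordered ≠ [] so both are in range and `.getD 0` is exact
def max_and_min_frequency_alt (frequencies : List (String × Int)) : Int × Int :=
  let ordered := PySem.List.sorted ((PySem.Dict.mk frequencies).values) (fun y => y) false
  if ordered = [] then (0, 0)
  else ((PySem.List.pyGet? ordered (-1)).getD 0, (PySem.List.pyGet? ordered 0).getD 0)

-- ===== PRECONDITION & SPEC =====
-- Pre_ excludes association lists with duplicate keys: a Python dict cannot contain them,
-- so such lists do not represent any input A actually receives.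
def Pre_max_and_min_frequency (frequencies : List (String × Int)) : Prop :=
  (frequencies.map Prod.fst).Nodup
instance (frequencies : List (String × Int)) : Decidable (Pre_max_and_min_frequency frequencies) := by
  unfold Pre_max_and_min_frequency; infer_instance

def pvWitness_max_and_min_frequency : (List (String × Int)) := [("a", 3), ("b", -1), ("c", 7)]

def Spec_max_and_min_frequency (frequencies : List (String × Int)) (out : Int × Int) : Prop :=
  out = max_and_min_frequency_alt frequencies
instance (frequencies : List (String × Int)) (out : Int × Int) : Decidable (Spec_max_and_min_frequency frequencies out) := by
  unfold Spec_max_and_min_frequency; infer_instance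

-- ===== CLAIM (what is proved, stated in full; the proofs are below) =====
def Claim_equal_max_and_min_frequency : Prop := ∀ (frequencies : List (String × Int)), Dom_max_and_min_frequency frequencies → Pre_max_and_min_frequency frequencies → Spec_max_and_min_frequency frequencies (max_and_min_frequency frequencies)

-- ===== LEMMAS AND PROOFS =====

-- under Nodup keys, looking an element's key up in the dict gives back its value
theorem pv_lookup_eq (fs : List (String × Int)) (h : (fs.map Prod.fst).Nodup) :
    ∀ k v, (k, v) ∈ fs → (PySem.Dict.mk fs).getD k 0 = v := by
  induction fs with
  | nil => intro k v hk; simp at hk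
  | cons p rest ih =>
    intro k v hk
    obtain ⟨hk1, hk2⟩ : p.1 ∉ (rest.map Prod.fst) ∧ (rest.map Prod.fst).Nodup := by
      rw [List.map_cons, List.nodup_cons] at h; exact h
    rcases List.mem_cons.mp hk with h1 | h1
    · cases h1
      show ((PySem.Dict.mk ((k, v) :: rest)).get? k).getD 0 = v
      rw [PySem.Dict.get?_mk_cons]
      simp
    · have hne : p.1 ≠ k := by
        intro he
        exact hk1 (he ▸ (List.mem_map.mpr ⟨(k, v), h1, rfl⟩))
      show ((PySem.Dict.mk (p :: rest)).get? k).getD 0 = v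
      obtain ⟨pk, pv⟩ := p
      rw [PySem.Dict.get?_mk_cons]
      simp only [beq_iff_eq, if_neg hne]
      exact ih hk2 k v h1

-- the fold from a `some`-state computes running max / running min of the values
theorem pv_fold_some (fs : List (String × Int)) :
    ∀ (l : List (String × Int)), (∀ p ∈ l, (PySem.Dict.mk fs).getD p.1 0 = p.2) →
    ∀ (e e' : String) (mF mnF : Int),
    ∃ a b, (l.map Prod.fst).foldl (pvStepA fs) (some e, mF, some e', mnF)
      = (some a, (l.map Prod.snd).foldl max mF, some b, (l.map Prod.snd).foldl min mnF) := by
  intro l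
  induction l with
  | nil => intro _ e e' mF mnF; exact ⟨e, e', rfl⟩
  | cons p t ih =>
    intro hl e e' mF mnF
    obtain ⟨k, v⟩ := p
    have hv : (PySem.Dict.mk fs).getD k 0 = v := hl (k, v) (List.mem_cons_self)
    have hstep : pvStepA fs (some e, mF, some e', mnF) k
        = (some (if mF < v then k else e), max mF v, some (if mnF > v then k else e'), min mnF v) := by
      simp only [pvStepA, hv]
      by_cases h1 : mF < v <;> by_cases h2 : mnF > v <;>
        simp [h1, h2, max_def, min_def] <;> omega
    have ht : ∀ p ∈ t, (PySem.Dict.mk fs).getD p.1 0 = p.2 := by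
      intro q hq; exact hl q (List.mem_cons_of_mem _ hq)
    simp only [List.map_cons, List.foldl_cons, hstep]
    exact ih ht _ _ _ _

-- in a ≤-sorted list every element is at most the last one
theorem pv_le_getLast : ∀ (l : List Int) (h : l ≠ []), l.Pairwise (· ≤ ·) →
    ∀ x ∈ l, x ≤ l.getLast h := by
  intro l
  induction l with
  | nil => intro h; simp at h
  | cons a t ih =>
    intro _ hp x hx
    obtain ⟨ha, ht⟩ := List.pairwise_cons.mp hp
    cases t with
    | nil => simp at hx; simp [hx]
    | cons b t' =>
      rw [List.getLast_cons (by simp)]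
      rcases List.mem_cons.mp hx with h1 | h1
      · exact h1 ▸ le_trans (ha _ (List.getLast_mem _)) (le_refl _)
      · exact ih (by simp) ht x h1

-- ===== VERDICT (by name: the statement is the Claim_ definition above) =====
theorem max_and_min_frequency_spec : Claim_equal_max_and_min_frequency := by
  intro fs _ hpre
  unfold Spec_max_and_min_frequency
  cases fs with
  | nil => rfl
  | cons p t =>
    obtain ⟨k, v⟩ := p
    have hnd : (((k, v) :: t).map Prod.fst).Nodup := hpre
    have hv : (PySem.Dict.mk ((k, v) :: t)).getD k 0 = v :=
      pv_lookup_eq _ hnd k v (List.mem_cons_self)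
    have ht : ∀ q ∈ t, (PySem.Dict.mk ((k, v) :: t)).getD q.1 0 = q.2 := by
      intro q hq
      obtain ⟨qk, qv⟩ := q
      exact pv_lookup_eq _ hnd qk qv (List.mem_cons_of_mem _ hq)
    obtain ⟨a, b, hfold⟩ := pv_fold_some ((k, v) :: t) t ht k k v v
    have hfirst : pvStepA ((k, v) :: t) (none, 0, none, 0) k = (some k, v, some k, v) := by
      simp [pvStepA, hv]
    have hkeys : (PySem.Dict.mk ((k,v)::t)).keys = k :: t.map Prod.fst := by
      simp [PySem.Dict.keys]
    show ((((PySem.Dict.mk ((k,v)::t)).keys).foldl (pvStepA ((k,v)::t)) (none, 0, none, 0)).2.1,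
          (((PySem.Dict.mk ((k,v)::t)).keys).foldl (pvStepA ((k,v)::t)) (none, 0, none, 0)).2.2.2)
        = max_and_min_frequency_alt ((k, v) :: t)
    rw [hkeys]
    simp only [List.foldl_cons, hfirst, hfold]
    -- A's side is now the running max / running min of the values; show B's endpoints equal them
    have hvals : (PySem.Dict.mk ((k,v)::t)).values = v :: t.map Prod.snd := by
      simp [PySem.Dict.values]
    set l : List Int := v :: t.map Prod.snd with hl
    set s : List Int := PySem.List.sorted l (fun y => y) false with hs
    have hperm : s.Perm l := PySem.List.sorted_perm l (fun y => y) false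
    have hsne : s ≠ [] := by
      intro he
      have : l = [] := (PySem.List.sorted_eq_nil_iff l (fun y => y) false).mp (hs ▸ he)
      simp [hl] at this
    have hpw : s.Pairwise (· ≤ ·) := by
      have := PySem.List.sorted_pairwise (xs := l) (key := fun y => y)
      simpa using this
    set M : Int := (t.map Prod.snd).foldl max v with hM
    set m : Int := (t.map Prod.snd).foldl min v with hm
    -- characterise the extremes of l
    have hMmem : M ∈ l := by
      rcases PySem.List.foldl_max_mem (t.map Prod.snd) v with h1 | h1
      · rw [hM, h1]; exact List.mem_cons_self
      · exact List.mem_cons_of_mem _ h1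
    have hmmem : m ∈ l := by
      rcases PySem.List.foldl_min_mem (t.map Prod.snd) v with h1 | h1
      · rw [hm, h1]; exact List.mem_cons_self
      · exact List.mem_cons_of_mem _ h1
    have hMub : ∀ y ∈ l, y ≤ M := by
      intro y hy
      rcases List.mem_cons.mp hy with h1 | h1
      · exact h1 ▸ (PySem.List.le_foldl_max (t.map Prod.snd) v).1
      · exact (PySem.List.le_foldl_max (t.map Prod.snd) v).2 y h1
    have hmlb : ∀ y ∈ l, m ≤ y := by
      intro y hy
      rcases List.mem_cons.mp hy with h1 | h1
      · exact h1 ▸ (PySem.List.foldl_min_le (t.map Prod.snd) v).1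
      · exact (PySem.List.foldl_min_le (t.map Prod.snd) v).2 y h1
    -- last of the sorted list = M
    have hlast : s.getLast hsne = M := by
      apply le_antisymm
      · exact hMub _ (hperm.mem_iff.mp (List.getLast_mem hsne))
      · exact pv_le_getLast s hsne hpw M (hperm.mem_iff.mpr hMmem)
    have hlast? : s.getLast? = some M := by
      rw [List.getLast?_eq_some_getLast hsne, hlast]
    -- head of the sorted list = m
    obtain ⟨h0, s', hcons⟩ := List.exists_cons_of_ne_nil hsne
    have hhead : h0 = m := by
      apply le_antisymm
      · simpa using PySem.List.key_head_sorted_le _ _ (hs.symm.trans hcons) m hmmem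
      · exact hmlb _ (hperm.mem_iff.mp (hcons ▸ List.mem_cons_self))
    show (M, m) = max_and_min_frequency_alt ((k, v) :: t)
    simp only [max_and_min_frequency_alt, hvals, ← hs, if_neg hsne]
    rw [PySem.List.pyGet?_neg_one, hlast?, hcons, PySem.List.pyGet?_zero_cons]
    simp [hhead]
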